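-- pv_equiv track=rewrite | github.com/charleslwang/Discrete-Math-Projects | Coding-3/coding3.py | cookies_for_friends
-- ===== SOURCE A (Python) =====
-- def cookies_for_friends(cookie_shop, k):
--     """Computes the minimum number of cookies that need to be purchased in
--     order to guarantee that k friends get two of the same flavor of cookie.
--
--     Args:
--         cookie_shop [list[int]]: a list of how many of each cookie a shop has,
--                                  where index 0 is chocolate chip, 1 is macademia nut,
--                                  and 2 is oatmeal raisin
--         k [int]: number of friends that you want to have two cookies of the same flavor
--
--     Returns:
--         min_cookies [int]: either the minimum number of cookies or -1 if impossible
--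
--     """
--
--     min_cookies = 0
--
--     if sum(cookie_shop) < 2 * k:
--         return -1
--
--     x = cookie_shop[0] // 2
--     y = cookie_shop[1] // 2
--     z = cookie_shop[2] // 2
--
--     total = x+y+z
--
--     while total > 0 and k > 0:
--         k -= 1
--         total -= 1
--         min_cookies += 2
--
--     return min_cookies + 2
-- ===== SOURCE B (Python) =====
-- def cookies_for_friends(cookie_shop, k):
--     if sum(cookie_shop) < 2 * k:
--         return -1
--     pairs = cookie_shop[0] // 2 + cookie_shop[1] // 2 + cookie_shop[2] // 2
--     return 2 * max(0, min(pairs, k)) + 2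
-- ===== Notes on version B (the rewrite author's own statement) =====
-- stated objective: simpler
-- what changed: Replaced the decrementing while-loop over min(total,k) by the closed form 2*max(0,min(pairs,k))+2 after the sum<2k check.
import Mathlib
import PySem

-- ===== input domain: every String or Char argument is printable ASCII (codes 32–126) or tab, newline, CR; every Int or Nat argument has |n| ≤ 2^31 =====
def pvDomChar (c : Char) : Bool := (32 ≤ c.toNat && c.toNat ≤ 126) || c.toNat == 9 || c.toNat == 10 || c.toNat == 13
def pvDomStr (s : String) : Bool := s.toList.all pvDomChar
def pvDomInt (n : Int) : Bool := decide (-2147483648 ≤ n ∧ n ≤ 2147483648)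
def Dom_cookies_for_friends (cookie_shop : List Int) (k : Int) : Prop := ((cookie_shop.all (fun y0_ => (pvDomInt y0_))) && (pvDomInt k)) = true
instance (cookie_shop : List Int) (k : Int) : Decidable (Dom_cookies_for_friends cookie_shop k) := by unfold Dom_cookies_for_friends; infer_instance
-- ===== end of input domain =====

-- B replaces A's decrementing while-loop with the closed form 2*max(0,min(pairs,k))+2 (objective: simpler).

-- ===== PORT A =====
-- A's while loop: `while total > 0 and k > 0: k -= 1; total -= 1; min_cookies += 2`
def cookiesLoopA (total k mc : Int) : Int :=
  if total > 0 ∧ k > 0 then cookiesLoopA (total - 1) (k - 1) (mc + 2) else mc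
termination_by total.toNat
decreasing_by
  rename_i h
  omega

def cookies_for_friends (cookie_shop : List Int) (k : Int) : Int :=
  if cookie_shop.sum < 2 * k then -1
  else
    -- cookie_shop[0], [1], [2]: IndexError (= none) excluded by Pre_; 0 is an unreached placeholder
    match PySem.List.pyGet? cookie_shop 0, PySem.List.pyGet? cookie_shop 1, PySem.List.pyGet? cookie_shop 2 with
    | some a, some b, some c =>
        let x := PySem.Int.floordiv a 2
        let y := PySem.Int.floordiv b 2
        let z := PySem.Int.floordiv c 2
        cookiesLoopA (x + y + z) k 0 + 2
    | _, _, _ => 0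

-- ===== PORT B =====
def cookies_for_friends_alt (cookie_shop : List Int) (k : Int) : Int :=
  if cookie_shop.sum < 2 * k then -1
  else
    match PySem.List.pyGet? cookie_shop 0 with
    | none => 0
    | some a =>
      match PySem.List.pyGet? cookie_shop 1 with
      | none => 0
      | some b =>
        match PySem.List.pyGet? cookie_shop 2 with
        | none => 0
        | some c =>
          let pairs := PySem.Int.floordiv a 2 + PySem.Int.floordiv b 2 + PySem.Int.floordiv c 2
          2 * max 0 (min pairs k) + 2

-- ===== PRECONDITION & SPEC =====
-- Pre_ excludes exactly the inputs where A (and B alike) raises IndexError: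
-- lists of fewer than 3 elements that pass the sum < 2*k early return.
def Pre_cookies_for_friends (cookie_shop : List Int) (k : Int) : Prop :=
  cookie_shop.sum < 2 * k ∨ 3 ≤ cookie_shop.length
instance (cookie_shop : List Int) (k : Int) : Decidable (Pre_cookies_for_friends cookie_shop k) := by unfold Pre_cookies_for_friends; infer_instance
def pvWitness_cookies_for_friends : List Int × Int := ([5, 4, 3], 2)
def Spec_cookies_for_friends (cookie_shop : List Int) (k : Int) (out : Int) : Prop := out = cookies_for_friends_alt cookie_shop k
instance (cookie_shop : List Int) (k : Int) (out : Int) : Decidable (Spec_cookies_for_friends cookie_shop k out) := by unfold Spec_cookies_for_friends; infer_instance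

-- ===== CLAIM (what is proved, stated in full; the proofs are below) =====
def Claim_equal_cookies_for_friends : Prop := ∀ (cookie_shop : List Int) (k : Int), Dom_cookies_for_friends cookie_shop k → Pre_cookies_for_friends cookie_shop k → Spec_cookies_for_friends cookie_shop k (cookies_for_friends cookie_shop k)

-- ===== LEMMAS AND PROOFS =====
theorem cookiesLoopA_eq (total k mc : Int) :
    cookiesLoopA total k mc = mc + 2 * max 0 (min total k) := by
  fun_induction cookiesLoopA total k mc with
  | case1 total k mc h ih => rw [ih]; omega
  | case2 total k mc h => omega

-- ===== VERDICT (by name: the statement is the Claim_ definition above) =====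
theorem cookies_for_friends_spec : Claim_equal_cookies_for_friends := by
  intro cs k _ hpre
  unfold Spec_cookies_for_friends cookies_for_friends cookies_for_friends_alt
  by_cases hs : cs.sum < 2 * k
  · simp [hs]
  · simp only [hs, if_false]
    have hlen : 3 ≤ cs.length := by
      rcases hpre with h | h
      · exact absurd h hs
      · exact h
    match cs, hlen with
    | a :: b :: c :: rest, _ =>
      simp [PySem.List.pyGet?, PySem.List.pyIdx?, cookiesLoopA_eq,
        show (0:Int) ≤ (rest.length:Int)+1+1 by positivity,
        show (0:Int) ≤ (rest.length:Int)+1 by positivity,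
        show (2:Int) ≤ (rest.length:Int)+1+1 by omega]
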